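-- pv_equiv track=rewrite | github.com/adriancoolguy/Personal-Document-Scanner | data_loader.py | is_financial_column
-- ===== SOURCE A (Python) =====
-- def is_financial_column(column_name: str) -> bool:
--     """Check if a column name suggests financial data."""
--     financial_keywords = [
--         'revenue', 'income', 'expense', 'profit', 'loss', 'earnings',
--         'cash', 'debt', 'equity', 'assets', 'liabilities', 'balance',
--         'cost', 'price', 'value', 'amount', 'total', 'net', 'gross',
--         'margin', 'ratio', 'rate', 'percent', 'percentage', 'growth',
--         'return', 'dividend', 'interest', 'tax', 'depreciation',
--         'amortization', 'capital', 'investment', 'fund', 'budget',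
--         'forecast', 'projection', 'estimate', 'actual', 'target'
--     ]
--
--     column_name = str(column_name).lower()
--     return any(keyword in column_name for keyword in financial_keywords)
-- ===== SOURCE B (Python) =====
-- def is_financial_column(column_name: str) -> bool:
--     """Check if a column name suggests financial data."""
--     words = ("revenue income expense profit loss earnings cash debt equity assets "
--              "liabilities balance cost price value amount total net gross margin "
--              "ratio rate percent percentage growth return dividend interest tax "
--              "depreciation amortization capital investment fund budget forecast "
--              "projection estimate actual target").split()
--     keywords = set(words)
--     lengths = sorted({len(w) for w in words})
--     s = str(column_name).lower()
--     return any(s[i:i + n] in keywords for i in range(len(s)) for n in lengths)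
-- ===== Notes on version B (the rewrite author's own statement) =====
-- stated objective: alternative
-- what changed: A makes one full substring scan of the lowered name per keyword (40 'in' tests); B instead slides a window over the name once, testing each of the 9 distinct keyword lengths at each position by hash-set lookup of the slice, so no per-keyword substring scan remains.
import Mathlib
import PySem

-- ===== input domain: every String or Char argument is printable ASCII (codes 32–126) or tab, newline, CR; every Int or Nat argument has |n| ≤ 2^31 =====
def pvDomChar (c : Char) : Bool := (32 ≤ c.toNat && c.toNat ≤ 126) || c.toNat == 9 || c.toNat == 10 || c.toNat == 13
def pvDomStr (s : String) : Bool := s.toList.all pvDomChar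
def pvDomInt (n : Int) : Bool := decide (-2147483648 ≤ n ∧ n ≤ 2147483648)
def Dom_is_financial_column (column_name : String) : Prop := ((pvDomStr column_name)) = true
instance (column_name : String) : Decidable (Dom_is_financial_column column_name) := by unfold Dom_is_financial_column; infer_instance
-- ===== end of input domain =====

-- B replaces A's keyword-major loop (one substring scan of the lowered name per keyword)
-- by a single sliding-window pass: at each position it looks up the slice of each of the
-- 9 distinct keyword lengths in a set of the keywords (alternative algorithm, same cost class).


-- ===== PORT A =====
def finKeywordsA : List String :=
  ["revenue", "income", "expense", "profit", "loss", "earnings",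
   "cash", "debt", "equity", "assets", "liabilities", "balance",
   "cost", "price", "value", "amount", "total", "net", "gross",
   "margin", "ratio", "rate", "percent", "percentage", "growth",
   "return", "dividend", "interest", "tax", "depreciation",
   "amortization", "capital", "investment", "fund", "budget",
   "forecast", "projection", "estimate", "actual", "target"]

def is_financial_column (column_name : String) : Bool :=
  finKeywordsA.any (fun keyword => PySem.Str.isIn keyword (PySem.Str.lower column_name))

-- ===== PORT B =====
-- words = "… ….split()
def finWordsB : List String :=
  PySem.Str.split₀ ("revenue income expense profit loss earnings cash debt equity assets " ++
    "liabilities balance cost price value amount total net gross margin " ++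
    "ratio rate percent percentage growth return dividend interest tax " ++
    "depreciation amortization capital investment fund budget forecast " ++
    "projection estimate actual target")

-- keywords = set(words)
def finKwSetB : PySem.Set String := PySem.Set.ofList finWordsB

-- lengths = sorted({len(w) for w in words})
def finLensB : List Int :=
  PySem.List.sorted (PySem.Set.ofList (finWordsB.map PySem.Str.len)) (fun n => n) false

-- any(s[i:i+n] in keywords for i in range(len(s)) for n in lengths)
def is_financial_column_alt (column_name : String) : Bool :=
  let s := PySem.Str.lower column_name
  (PySem.List.pyRange 0 (PySem.Str.len s)).any (fun i =>
    finLensB.any (fun n => finKwSetB.contains (PySem.Str.slice s (some i) (some (i + n)))))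

-- ===== PRECONDITION & SPEC =====
def Spec_is_financial_column (column_name : String) (out : Bool) : Prop := out = is_financial_column_alt column_name
instance (column_name : String) (out : Bool) : Decidable (Spec_is_financial_column column_name out) := by unfold Spec_is_financial_column; infer_instance

-- ===== CLAIM (what is proved, stated in full; the proofs are below) =====
def Claim_equal_is_financial_column : Prop := ∀ (column_name : String), Dom_is_financial_column column_name → Spec_is_financial_column column_name (is_financial_column column_name)

-- ===== LEMMAS AND PROOFS =====

-- the split() of B's joined literal is exactly A's keyword list
set_option maxRecDepth 40000 in
lemma words_eq : finWordsB = finKeywordsA := by decide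

set_option maxRecDepth 40000 in
lemma keywords_ne_nil : ∀ k ∈ finKeywordsA, k.toList ≠ [] := by decide

-- the distinct keyword lengths, sorted
set_option maxRecDepth 40000 in
lemma lens_eq : finLensB = [3, 4, 5, 6, 7, 8, 10, 11, 12] := by
  unfold finLensB
  rw [words_eq]
  decide

set_option maxRecDepth 40000 in
lemma len_mem_lens : ∀ k ∈ finKeywordsA, ((k.toList.length : Int)) ∈ finLensB := by
  rw [lens_eq]; decide

lemma lens_nonneg : ∀ n ∈ finLensB, 0 ≤ n := by rw [lens_eq]; decide

-- an infix of cs occurs as the length-|k| window at some position j < |cs|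
lemma infix_iff_window (k cs : List Char) (hk : k ≠ []) :
    k <:+: cs ↔ ∃ j : Nat, j < cs.length ∧ (cs.drop j).take k.length = k := by
  constructor
  · rintro ⟨s₁, t₁, rfl⟩
    refine ⟨s₁.length, ?_, ?_⟩
    · have : k.length ≠ 0 := by simpa using hk
      simp [List.length_append]; omega
    · rw [List.append_assoc, List.drop_left, List.take_left]
  · rintro ⟨j, -, hw⟩
    rw [← hw]
    exact ((List.take_prefix _ _).isInfix).trans ((List.drop_suffix j cs).isInfix)

lemma main_iff (t : String) :
    (∃ k ∈ finKeywordsA, PySem.Chars.isIn k.toList t.toList = true) ↔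
    (∃ i ∈ PySem.List.pyRange 0 (PySem.Str.len t), ∃ n ∈ finLensB,
        finKwSetB.contains (PySem.Str.slice t (some i) (some (i + n))) = true) := by
  have hmem : ∀ x : String, finKwSetB.contains x = true ↔ x ∈ finKeywordsA := by
    intro x
    rw [finKwSetB.contains_iff, finKwSetB, words_eq, PySem.Set.mem_ofList]
  have hrange : ∀ i : Int, i ∈ PySem.List.pyRange 0 (PySem.Str.len t) ↔
      ∃ j : Nat, j < t.toList.length ∧ i = (j : Int) := by
    intro i
    rw [PySem.Str.len_eq, PySem.List.pyRange_one]
    simp [eq_comm]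
  constructor
  · rintro ⟨k, hkA, hin⟩
    rw [PySem.Chars.isIn_iff_infix] at hin
    obtain ⟨j, hj, hwin⟩ := (infix_iff_window _ _ (keywords_ne_nil k hkA)).mp hin
    refine ⟨(j : Int), (hrange _).mpr ⟨j, hj, rfl⟩,
      ((k.toList.length : Int)), len_mem_lens k hkA, ?_⟩
    rw [hmem]
    have hslice : (PySem.Str.slice t (some (j : Int)) (some ((j : Int) + (k.toList.length : Int)))).toList = k.toList := by
      rw [PySem.Str.toList_slice]
      show PySem.List.slice t.toList (some (j : Int)) (some ((j : Int) + (k.toList.length : Int))) = k.toList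
      rw [PySem.List.slice_natCast_add, hwin]
    rw [String.toList_inj.mp hslice]
    exact hkA
  · rintro ⟨i, hi, n, hn, hc⟩
    obtain ⟨j, hj, rfl⟩ := (hrange i).mp hi
    rw [hmem] at hc
    refine ⟨_, hc, ?_⟩
    rw [PySem.Chars.isIn_iff_infix]
    have htl : (PySem.Str.slice t (some (j : Int)) (some ((j : Int) + n))).toList
        = PySem.List.slice t.toList (some (j : Int)) (some ((j : Int) + n)) := PySem.Str.toList_slice t _ _
    rw [htl]
    have hn0 : (0 : Int) ≤ n := lens_nonneg n hn
    have h0a : (0 : Int) ≤ (j : Int) := by omega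
    have h0b : (0 : Int) ≤ (j : Int) + n := by omega
    rw [PySem.List.slice_toNat _ h0a h0b]
    exact ((List.take_prefix _ _).isInfix).trans ((List.drop_suffix _ _).isInfix)

theorem is_financial_column_spec : Claim_equal_is_financial_column := by
  intro s _
  unfold Spec_is_financial_column is_financial_column is_financial_column_alt
  rw [Bool.eq_iff_iff]
  simp only [List.any_eq_true, PySem.Str.isIn_eq]
  exact (main_iff (PySem.Str.lower s)).trans (by rfl)
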